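-- pv_equiv track=rewrite | github.com/Progambler227788/CP-CompetativeProgramming | optimized.py | griDSolving
-- ===== SOURCE A (Python) =====
-- def griDSolving(grid):
--     rows = len(grid)
--     cols = len(grid[0])
--
--     total_sum = 0
--     total_abs_sum = 0
--     count_negatives = 0
--     min_abs_value = float('inf')
--     has_zero = False
--
--     for i in range(rows):
--         for j in range(cols):
--             value = grid[i][j]
--             abs_value = abs(value)
--             total_sum += value
--             total_abs_sum += abs_value
--
--             if value < 0:
--                 count_negatives += 1
--
--             if value == 0:
--                 has_zero = True
--
--             if abs_value < min_abs_value: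
--                 min_abs_value = abs_value
--
--     if count_negatives % 2 == 0 or has_zero:
--         return total_abs_sum
--     else:
--         return total_abs_sum - 2 * min_abs_value
-- ===== SOURCE B (Python) =====
-- def griDSolving(grid):
--     # DP over the flattened values: best achievable sum negating an even (resp. odd)
--     # number of the values seen so far; flipping signs in pairs = negating an even subset.
--     cols = len(grid[0])
--     even, odd = 0, None
--     for row in grid:
--         for v in row[:cols]:
--             if odd is None:
--                 even, odd = even + v, even - v
--             else:
--                 even, odd = max(even + v, odd - v), max(even - v, odd + v)
--     return even
-- ===== Notes on version B (the rewrite author's own statement) =====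
-- stated objective: alternative
-- what changed: B replaces A's aggregate-and-correct strategy (abs-sum, negative count, min-abs, zero flag, parity branch) by a two-state dynamic program over the flattened values that tracks the best sum achievable negating an even resp. odd number of values seen so far and returns the even state, with no abs-sum/min/count aggregates or final branch at all.
import Mathlib
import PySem

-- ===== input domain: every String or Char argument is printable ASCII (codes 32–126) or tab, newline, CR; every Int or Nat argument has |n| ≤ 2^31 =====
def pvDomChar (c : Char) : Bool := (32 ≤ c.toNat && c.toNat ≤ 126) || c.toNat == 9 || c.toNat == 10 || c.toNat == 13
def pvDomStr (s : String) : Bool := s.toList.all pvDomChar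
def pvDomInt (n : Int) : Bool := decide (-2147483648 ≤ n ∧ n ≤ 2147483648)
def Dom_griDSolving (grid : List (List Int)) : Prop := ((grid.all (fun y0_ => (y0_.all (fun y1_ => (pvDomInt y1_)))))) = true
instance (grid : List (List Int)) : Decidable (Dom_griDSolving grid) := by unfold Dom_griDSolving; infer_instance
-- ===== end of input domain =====

-- B replaces A's aggregates-plus-parity-branch by a two-state dynamic program (best sum with an
-- even / odd number of negated values so far); objective: alternative, same cost.

-- ===== PORT A =====
-- loop body of A: state (total_sum, total_abs_sum, count_negatives, min_abs_value, has_zero);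
-- min_abs_value = none models the initial float('inf'), which A never returns.
def griDStepA (st : Int × Int × Int × Option Int × Bool) (value : Int) :
    Int × Int × Int × Option Int × Bool :=
  let absValue := |value|
  (st.1 + value,
   st.2.1 + absValue,
   if value < 0 then st.2.2.1 + 1 else st.2.2.1,
   (match st.2.2.2.1 with
    | none => some absValue
    | some m => if absValue < m then some absValue else some m),
   if value = 0 then true else st.2.2.2.2)

def griDSolving (grid : List (List Int)) : Int :=
  let rows : Int := grid.length
  let cols : Int := ((PySem.List.pyGetD grid 0 ([] : List Int)).length : Int)  -- grid[0]: IndexError on [] is outside Pre_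
  let st := (PySem.List.pyRange 0 rows 1).foldl
    (fun st i => (PySem.List.pyRange 0 cols 1).foldl
      (fun st j => griDStepA st (PySem.List.pyGetD (PySem.List.pyGetD grid i ([] : List Int)) j 0)) st)
    (0, 0, 0, none, false)
  if PySem.Int.mod st.2.2.1 2 = 0 || st.2.2.2.2 then st.2.1
  else st.2.1 - 2 * st.2.2.2.1.getD 0  -- in this branch count_negatives is odd, so min_abs_value is a real Int

-- ===== PORT B =====
-- DP step: (even, odd) = best sum negating an even / odd number of values so far; odd = none = -inf
def griDStepB (st : Int × Option Int) (v : Int) : Int × Option Int :=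
  match st with
  | (e, none) => (e + v, some (e - v))
  | (e, some o) => (max (e + v) (o - v), some (max (e - v) (o + v)))

def griDSolving_alt (grid : List (List Int)) : Int :=
  let cols : Int := ((PySem.List.pyGetD grid 0 ([] : List Int)).length : Int)
  (grid.foldl
    (fun st row => (PySem.List.slice row none (some cols)).foldl griDStepB st)  -- row[:cols]
    ((0 : Int), (none : Option Int))).1

-- ===== PRECONDITION & SPEC =====
-- Pre_ excludes exactly the inputs on which A raises IndexError: the empty grid (grid[0]) and
-- ragged grids with a row shorter than the first row (grid[i][j] for j < len(grid[0])).
def Pre_griDSolving (grid : List (List Int)) : Prop :=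
  grid ≠ [] ∧ ∀ row ∈ grid, (grid.headD []).length ≤ row.length
instance (grid : List (List Int)) : Decidable (Pre_griDSolving grid) := by unfold Pre_griDSolving; infer_instance

def pvWitness_griDSolving : List (List Int) := [[1, -2], [3, 4]]

def Spec_griDSolving (grid : List (List Int)) (out : Int) : Prop := out = griDSolving_alt grid
instance (grid : List (List Int)) (out : Int) : Decidable (Spec_griDSolving grid out) := by unfold Spec_griDSolving; infer_instance

-- ===== CLAIM (what is proved, stated in full; the proofs are below) =====
def Claim_equal_griDSolving : Prop := ∀ (grid : List (List Int)), Dom_griDSolving grid → Pre_griDSolving grid → Spec_griDSolving grid (griDSolving grid)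

-- ===== LEMMAS AND PROOFS =====

-- the min_abs_value accumulator on its own
def griDMinStep (mo : Option Int) (v : Int) : Option Int :=
  match mo with
  | none => some |v|
  | some m => if |v| < m then some |v| else some m

-- A's inner index loop over range(cols) is a fold over the truncated row.
theorem griD_inner_loop {α : Type} (f : α → Int → α) (row : List Int) (c : Nat)
    (hc : c ≤ row.length) (init : α) :
    (PySem.List.pyRange 0 (c : Int) 1).foldl
      (fun st j => f st (PySem.List.pyGetD row j 0)) init
      = (row.take c).foldl f init := by
  have hlen : ((row.take c).length : Int) = (c : Int) := by
    simp [List.length_take, Nat.min_eq_left hc]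
  rw [← hlen]
  have hcongr : ∀ (acc : α), ∀ j ∈ PySem.List.pyRange 0 ((row.take c).length : Int) 1,
      f acc (PySem.List.pyGetD row j 0) = f acc (PySem.List.pyGetD (row.take c) j 0) := by
    intro acc j hj
    rw [PySem.List.mem_pyRange_one] at hj
    have hj2 : 0 ≤ j ∧ j < (c : Int) := by omega
    rw [PySem.List.pyGetD_eq_getElem row 0 hj2.1 (by omega),
        PySem.List.pyGetD_eq_getElem (row.take c) 0 hj2.1 (by omega)]
    simp [List.getElem_take]
  rw [PySem.List.foldl_congr_mem _ _ _ init hcongr]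
  exact PySem.List.foldl_pyRange_zero_pyGetD' (row.take c) 0 f init

-- the fold of the 5-tuple step splits into five independent folds
theorem griD_foldl_split (l : List Int) (ts tas cn : Int) (mo : Option Int) (hz : Bool) :
    l.foldl griDStepA (ts, tas, cn, mo, hz)
      = (l.foldl (fun a v => a + v) ts,
         l.foldl (fun a v => a + |v|) tas,
         l.foldl (fun a v => if v < 0 then a + 1 else a) cn,
         l.foldl griDMinStep mo,
         l.foldl (fun a v => if v = 0 then true else a) hz) := by
  induction l generalizing ts tas cn mo hz with
  | nil => rfl
  | cons x t ih => simp only [List.foldl_cons, griDStepA, griDMinStep]; exact ih ..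

-- the min accumulator, started at some m, is the running min of absolute values
theorem griD_min_some (l : List Int) (m : Int) :
    l.foldl griDMinStep (some m) = some (l.foldl (fun a v => min a |v|) m) := by
  induction l generalizing m with
  | nil => rfl
  | cons x t ih =>
    simp only [List.foldl_cons, griDMinStep]
    by_cases h : |x| < m
    · rw [if_pos h, ih, min_eq_right (le_of_lt h)]
    · rw [if_neg h, ih, min_eq_left (by omega)]

-- running-min facts
theorem griD_fold_min_le_init (t : List Int) (b : Int) :
    t.foldl (fun a v => min a |v|) b ≤ b := by
  induction t generalizing b with
  | nil => simp
  | cons x t ih =>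
    simp only [List.foldl_cons]
    exact le_trans (ih (min b |x|)) (min_le_left _ _)

theorem griD_fold_min_nonneg (t : List Int) (b : Int) (hb : 0 ≤ b) :
    0 ≤ t.foldl (fun a v => min a |v|) b := by
  induction t generalizing b with
  | nil => simpa
  | cons x t ih =>
    simp only [List.foldl_cons]
    exact ih _ (le_min hb (abs_nonneg x))

theorem griD_fold_min_le_mem (t : List Int) (v : Int) :
    v ∈ t → ∀ b : Int, t.foldl (fun a v => min a |v|) b ≤ |v| := by
  induction t with
  | nil => intro hv; cases hv
  | cons x t ih =>
    intro hv b
    simp only [List.foldl_cons]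
    rcases List.mem_cons.mp hv with h | h
    · subst h
      exact le_trans (griD_fold_min_le_init t _) (min_le_right _ _)
    · exact ih h _

-- zero among the values drives the running min of absolute values to 0
theorem griD_min_zero (x : Int) (t : List Int) (h : (0 : Int) ∈ x :: t) :
    t.foldl (fun a v => min a |v|) |x| = 0 := by
  have h0 : 0 ≤ t.foldl (fun a v => min a |v|) |x| :=
    griD_fold_min_nonneg t |x| (abs_nonneg x)
  rcases List.mem_cons.mp h with hx | hx
  · have h1 := griD_fold_min_le_init t |x|
    have h2 : |x| = 0 := by rw [← hx]; simp
    omega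
  · have h1 := griD_fold_min_le_mem t 0 hx |x|
    simp only [abs_zero] at h1
    omega

-- the DP characterization: after a nonempty prefix, the even state is abs-sum corrected for odd
-- negative parity by twice the min abs, and the odd state is the mirror image
theorem griD_dp_char (x : Int) (t : List Int) :
    (x :: t).foldl griDStepB ((0 : Int), (none : Option Int))
      = (if (x :: t).countP (fun v => decide (v < 0)) % 2 = 0
           then (x :: t).foldl (fun a v => a + |v|) 0
           else (x :: t).foldl (fun a v => a + |v|) 0 - 2 * t.foldl (fun a v => min a |v|) |x|,
         some (if (x :: t).countP (fun v => decide (v < 0)) % 2 = 1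
           then (x :: t).foldl (fun a v => a + |v|) 0
           else (x :: t).foldl (fun a v => a + |v|) 0 - 2 * t.foldl (fun a v => min a |v|) |x|)) := by
  induction t using List.reverseRecOn with
  | nil =>
    simp only [List.foldl_cons, List.foldl_nil, griDStepB, List.countP_cons, List.countP_nil]
    by_cases hx : x < 0
    · simp [hx, abs_of_neg hx, Prod.ext_iff]
      omega
    · simp [hx, abs_of_nonneg (not_lt.mp hx), Prod.ext_iff]
      omega
  | append_singleton t v ih =>
    rw [← List.cons_append, List.foldl_append, ih, List.foldl_append, List.foldl_append,
        List.countP_append]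
    set S := (x :: t).foldl (fun a v => a + |v|) 0 with hS
    set m := t.foldl (fun a v => min a |v|) |x| with hm
    set k := (x :: t).countP (fun v => decide (v < 0)) with hk
    have hm0 : 0 ≤ m := griD_fold_min_nonneg t |x| (abs_nonneg x)
    simp only [List.foldl_cons, List.foldl_nil, List.countP_cons, List.countP_nil, griDStepB]
    by_cases hv : v < 0
    · simp only [hv, decide_true, abs_of_neg hv, Prod.mk.injEq, Option.some.injEq, max_def, min_def]
      constructor <;> split_ifs <;> omega
    · simp only [hv, decide_false, Bool.false_eq_true, if_false, Nat.add_zero,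
        abs_of_nonneg (not_lt.mp hv), Prod.mk.injEq, Option.some.injEq, max_def, min_def]
      constructor <;> split_ifs <;> omega

-- ===== VERDICT (by name: the statement is the Claim_ definition above) =====
theorem griDSolving_spec : Claim_equal_griDSolving := by
  intro grid _hdom hpre
  obtain ⟨hne, hall⟩ := hpre
  simp only [Spec_griDSolving, griDSolving, griDSolving_alt]
  have hhead : PySem.List.pyGetD grid 0 ([] : List Int) = grid.headD [] := by
    cases grid with
    | nil => exact absurd rfl hne
    | cons r t => simp [PySem.List.pyGetD_zero_cons]
  set c : Nat := (grid.headD []).length with hc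
  rw [hhead]
  -- A's nested loop becomes a fold of griDStepA over the flattened, truncated grid
  have houter :
      (PySem.List.pyRange 0 (grid.length : Int) 1).foldl
        (fun st i => (PySem.List.pyRange 0 (c : Int) 1).foldl
          (fun st j => griDStepA st (PySem.List.pyGetD (PySem.List.pyGetD grid i ([] : List Int)) j 0)) st)
        ((0,0,0,none,false) : Int × Int × Int × Option Int × Bool)
      = (grid.flatMap (fun row => row.take c)).foldl griDStepA (0,0,0,none,false) := by
    rw [PySem.List.foldl_pyRange_zero_pyGetD' grid ([] : List Int)
          (fun st row => (PySem.List.pyRange 0 (c : Int) 1).foldl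
            (fun st j => griDStepA st (PySem.List.pyGetD row j 0)) st)]
    rw [List.foldl_flatMap]
    exact PySem.List.foldl_congr_mem _ _ _ _ (fun acc row hrow =>
      griD_inner_loop griDStepA row c (hall row hrow) acc)
  rw [houter]
  -- B's nested loop becomes a fold of griDStepB over the same flattened values
  have hB : grid.foldl
      (fun st row => (PySem.List.slice row none (some ((c : Nat) : Int))).foldl griDStepB st)
      ((0 : Int), (none : Option Int))
      = (grid.flatMap (fun row => row.take c)).foldl griDStepB ((0 : Int), (none : Option Int)) := by
    rw [List.foldl_flatMap]
    exact PySem.List.foldl_congr_mem _ _ _ _ (fun acc row _ => by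
      rw [PySem.List.slice_to_natCast])
  rw [hB]
  set vals := grid.flatMap (fun row => row.take c) with hvals
  rw [griD_foldl_split]
  dsimp only
  have hcn : vals.foldl (fun a v => if v < 0 then a + 1 else a) (0 : Int)
      = (vals.countP (fun v => decide (v < 0)) : Int) := by
    rw [PySem.List.foldl_ite_add_one (fun v : Int => v < 0) vals 0]; simp
  have hhz : vals.foldl (fun a v => if v = 0 then true else a) false
      = vals.any (fun v => decide (v = 0)) := by
    rw [PySem.List.foldl_ite_true_eq]; simp
  rw [hcn, hhz]
  cases vals with
  | nil => simp [PySem.Int.mod]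
  | cons x t =>
    rw [griD_dp_char]
    have hmin : (x :: t).foldl griDMinStep none
        = some (t.foldl (fun a v => min a |v|) |x|) := by
      simp only [List.foldl_cons, griDMinStep]
      exact griD_min_some t |x|
    rw [hmin]
    set S := (x :: t).foldl (fun a v => a + |v|) 0 with hS
    set m := t.foldl (fun a v => min a |v|) |x| with hm
    set k := (x :: t).countP (fun v => decide (v < 0)) with hk
    have hmod : PySem.Int.mod ((k : Nat) : Int) 2 = ((k % 2 : Nat) : Int) :=
      PySem.Int.mod_natCast _ 2
    rw [hmod]
    by_cases hz : (x :: t).any (fun v => decide (v = 0)) = true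
    · -- a zero is present: m = 0, A returns S, B returns S in both parity cases
      have h0 : (0 : Int) ∈ x :: t := by
        rcases List.any_eq_true.mp hz with ⟨v, hv, hv0⟩
        simp at hv0; subst hv0; exact hv
      have hm0 : m = 0 := by rw [hm]; exact griD_min_zero x t h0
      simp only [hz, Bool.or_true, if_true, Option.getD_some, hm0]
      split_ifs <;> omega
    · have hz' : (x :: t).any (fun v => decide (v = 0)) = false := eq_false_of_ne_true hz
      simp only [hz', Bool.or_false, Option.getD_some]
      by_cases hpar : k % 2 = 0
      · simp [hpar]
      · have h1 : ¬ (((k % 2 : Nat) : Int) = 0) := by omega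
        have h2 : k % 2 = 1 := by omega
        simp only [h1, if_false, decide_eq_true_eq, if_neg hpar]
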